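-- pv_equiv track=rewrite | github.com/SimGus/Chatette | chatette/parsing/parser_utils.py | add_escapement_back_in_unit_ref
-- ===== SOURCE A (Python) =====
-- COMMENT_SYM_DEPRECATED = ';'
--
-- COMMENT_MARKER = '//'
--
-- ESCAPE_SYM = '\\'
--
-- ALIAS_SYM = '~'
--
-- SLOT_SYM = '@'
--
-- INTENT_SYM = '%'
--
-- UNIT_OPEN_SYM = '['  # This shouldn't be changed
--
-- UNIT_CLOSE_SYM = ']'  # id.
--
-- CHOICE_OPEN_SYM = r'{'
--
-- CHOICE_CLOSE_SYM = r'}'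
--
-- VARIATION_SYM = '#'
--
-- RAND_GEN_SYM = '?'  # This shouldn't be changed
--
-- PERCENT_GEN_SYM = '/'
--
-- CASE_GEN_SYM = '&'
--
-- ARG_SYM = '$'  # This shouldn't be changed
--
-- def add_escapement_back_for_not_comments(text):
--     """
--     Considering that `text` contains no comment,
--     escape comment markers and returns the new text.
--     This function is needed because comment markers are several characters long.
--     @pre: there is no comments anymore in `text`.
--     """
--     return text.replace(COMMENT_MARKER, ESCAPE_SYM+COMMENT_MARKER)
--
-- def add_escapement_back_in_unit_ref(unit_name):
--     """
--     Put back escapement where it belongs for unit names in references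
--     where escapement have been removed.
--     """
--     escaped_text = ""
--     for c in unit_name:
--         if (   c == ESCAPE_SYM or is_boundary_sym(c) or is_comment_sym(c)
--             or is_unit_ref_modifier_sym(c)):
--             escaped_text += ESCAPE_SYM + c
--         else:
--             escaped_text += c
--     return add_escapement_back_for_not_comments(escaped_text)
--
-- def is_comment_sym(text):
--     """Returns `True` iff `text` is a symbol introducing a comment."""
--     return text in (COMMENT_MARKER, COMMENT_SYM_DEPRECATED)
--
-- def is_boundary_sym(text):
--     """
--     Returns `True` iff `text` is a symbol
--     that makes the boundaries of special sub-rules.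
--     """
--     return text in (ALIAS_SYM, SLOT_SYM, INTENT_SYM, UNIT_OPEN_SYM,
--                     UNIT_CLOSE_SYM, CHOICE_OPEN_SYM, CHOICE_CLOSE_SYM)
--
-- def is_unit_ref_modifier_sym(text):
--     """
--     Returns `True` iff ´text´ is a special symbol introducing a modifier that
--     can label unit references.
--     """
--     return text in (CASE_GEN_SYM, RAND_GEN_SYM, PERCENT_GEN_SYM, VARIATION_SYM,
--                     ARG_SYM)
-- ===== SOURCE B (Python) =====
-- COMMENT_SYM_DEPRECATED = ';'
-- COMMENT_MARKER = '//'
-- ESCAPE_SYM = '\\'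
-- ALIAS_SYM = '~'
-- SLOT_SYM = '@'
-- INTENT_SYM = '%'
-- UNIT_OPEN_SYM = '['
-- UNIT_CLOSE_SYM = ']'
-- CHOICE_OPEN_SYM = r'{'
-- CHOICE_CLOSE_SYM = r'}'
-- VARIATION_SYM = '#'
-- RAND_GEN_SYM = '?'
-- PERCENT_GEN_SYM = '/'
-- CASE_GEN_SYM = '&'
-- ARG_SYM = '$'
--
-- _SINGLE_CHAR_SPECIALS = (ALIAS_SYM + SLOT_SYM + INTENT_SYM + UNIT_OPEN_SYM
--                          + UNIT_CLOSE_SYM + CHOICE_OPEN_SYM + CHOICE_CLOSE_SYM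
--                          + COMMENT_SYM_DEPRECATED + CASE_GEN_SYM + RAND_GEN_SYM
--                          + PERCENT_GEN_SYM + VARIATION_SYM + ARG_SYM)
--
-- def add_escapement_back_in_unit_ref(unit_name):
--     # Stage 1: double every pre-existing escape character first, so the
--     # backslashes inserted by the later stages are never re-escaped.
--     escaped = unit_name.replace(ESCAPE_SYM, ESCAPE_SYM + ESCAPE_SYM)
--     # Stage 2: one whole-string replace pass per special symbol.
--     for sym in _SINGLE_CHAR_SPECIALS:
--         escaped = escaped.replace(sym, ESCAPE_SYM + sym)
--     # Stage 3: escape the two-character comment marker.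
--     return escaped.replace(COMMENT_MARKER, ESCAPE_SYM + COMMENT_MARKER)
-- ===== Notes on version B (the rewrite author's own statement) =====
-- stated objective: alternative
-- what changed: Replaces A's single per-character Python loop (membership tests and string concatenation per char) by staged whole-string replace passes: first double every escape character, then one replace pass per special symbol (that order makes the passes commute with A's per-char map), then the same comment-marker replace.
import Mathlib
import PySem

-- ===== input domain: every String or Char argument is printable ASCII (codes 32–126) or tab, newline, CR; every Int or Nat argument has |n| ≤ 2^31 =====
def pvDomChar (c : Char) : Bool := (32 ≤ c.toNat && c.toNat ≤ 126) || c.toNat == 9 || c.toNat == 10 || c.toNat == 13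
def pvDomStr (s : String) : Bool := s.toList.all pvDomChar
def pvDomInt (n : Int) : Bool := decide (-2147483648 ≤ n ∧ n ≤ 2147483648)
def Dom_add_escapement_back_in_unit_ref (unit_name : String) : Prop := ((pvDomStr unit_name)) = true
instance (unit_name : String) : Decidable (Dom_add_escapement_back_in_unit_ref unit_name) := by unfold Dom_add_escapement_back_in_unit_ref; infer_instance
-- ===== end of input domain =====

-- B replaces A's per-character conditional loop by staged whole-string replace passes
-- (escape char doubled first, then one replace per special symbol, then the same
-- comment-marker replace); objective: alternative decomposition, same result.

-- ===== PORT A =====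
-- is_comment_sym(c) for a single character: c can never equal the two-char '//', so only ';' matches
def pyIsCommentSym (c : Char) : Bool := c == ';'
def pyIsBoundarySym (c : Char) : Bool :=
  c == '~' || c == '@' || c == '%' || c == '[' || c == ']' || c == '{' || c == '}'
def pyIsUnitRefModifierSym (c : Char) : Bool :=
  c == '&' || c == '?' || c == '/' || c == '#' || c == '$'

def add_escapement_back_in_unit_ref (unit_name : String) : String :=
  let escaped_text : List Char :=
    unit_name.toList.foldl
      (fun acc c =>
        if c == '\\' || pyIsBoundarySym c || pyIsCommentSym c || pyIsUnitRefModifierSym c then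
          acc ++ ['\\', c]
        else
          acc ++ [c])
      []
  -- add_escapement_back_for_not_comments
  PySem.Str.replace (String.ofList escaped_text) "//" "\\//"

-- ===== PORT B =====
-- _SINGLE_CHAR_SPECIALS
def pvSpecials : List Char := ['~', '@', '%', '[', ']', '{', '}', ';', '&', '?', '/', '#', '$']

def add_escapement_back_in_unit_ref_alt (unit_name : String) : String :=
  -- Stage 1: double every pre-existing escape character
  let escaped₁ := PySem.Str.replace unit_name "\\" "\\\\"
  -- Stage 2: one whole-string replace pass per special symbol
  let escaped₂ := pvSpecials.foldl
    (fun acc sym => PySem.Str.replace acc (String.ofList [sym]) (String.ofList ['\\', sym]))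
    escaped₁
  -- Stage 3: escape the two-character comment marker
  PySem.Str.replace escaped₂ "//" "\\//"

-- ===== PRECONDITION & SPEC =====
def Spec_add_escapement_back_in_unit_ref (unit_name : String) (out : String) : Prop := out = add_escapement_back_in_unit_ref_alt unit_name
instance (unit_name : String) (out : String) : Decidable (Spec_add_escapement_back_in_unit_ref unit_name out) := by unfold Spec_add_escapement_back_in_unit_ref; infer_instance

-- ===== CLAIM (what is proved, stated in full; the proofs are below) =====
def Claim_equal_add_escapement_back_in_unit_ref : Prop := ∀ (unit_name : String), Dom_add_escapement_back_in_unit_ref unit_name → Spec_add_escapement_back_in_unit_ref unit_name (add_escapement_back_in_unit_ref unit_name)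

-- ===== LEMMAS AND PROOFS =====

-- a single-character replace is the character-wise substitution
theorem pv_replace_go_single (c : Char) (new : List Char) :
    ∀ (l acc : List Char) (fuel : Nat), l.length ≤ fuel →
      PySem.Chars.replace.go [c] new fuel l acc =
        acc.reverse ++ l.flatMap (fun x => if x == c then new else [x]) := by
  intro l
  induction l with
  | nil => intro acc fuel _; cases fuel <;> simp [PySem.Chars.replace.go]
  | cons x t ih =>
    intro acc fuel hf
    cases fuel with
    | zero => simp at hf
    | succ f =>
      simp only [List.length_cons] at hf
      rw [PySem.Chars.replace.go]
      by_cases hx : x = c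
      · subst hx
        simp only [List.isPrefixOf, BEq.rfl, Bool.true_and, if_pos,
          List.length_cons, List.length_nil, List.drop_succ_cons, List.drop_zero]
        rw [ih (new.reverse ++ acc) f (by omega)]
        simp
      · have : ([c].isPrefixOf (x :: t)) = false := by
          simp [List.isPrefixOf, Ne.symm hx]
        simp only [this, Bool.false_eq_true, if_false]
        rw [ih (x :: acc) f (by omega)]
        simp [hx]

theorem pv_replace_single (c : Char) (new l : List Char) :
    PySem.Chars.replace l [c] new =
      l.flatMap (fun x => if x == c then new else [x]) := by
  rw [PySem.Chars.replace]
  simp only [List.isEmpty_cons, Bool.false_eq_true, if_false]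
  exact pv_replace_go_single c new l [] l.length le_rfl

-- A's accumulating loop as a flatMap
theorem pv_escaped_eq (l : List Char) :
    l.foldl
      (fun acc c =>
        if c == '\\' || pyIsBoundarySym c || pyIsCommentSym c || pyIsUnitRefModifierSym c then
          acc ++ ['\\', c]
        else
          acc ++ [c])
      [] =
    l.flatMap (fun c =>
      if c == '\\' || pyIsBoundarySym c || pyIsCommentSym c || pyIsUnitRefModifierSym c then
        ['\\', c] else [c]) := by
  have h := PySem.List.foldl_append_eq_flatMap
    (fun c : Char =>
      if c == '\\' || pyIsBoundarySym c || pyIsCommentSym c || pyIsUnitRefModifierSym c then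
        ['\\', c] else [c]) l []
  simp only [List.nil_append] at h
  rw [← h]
  apply PySem.List.foldl_congr_mem
  intro acc c _
  split_ifs <;> rfl

-- B's staged replaces compute the same character-wise substitution
theorem pv_staged_eq (l : List Char) :
    (pvSpecials.foldl
        (fun acc sym => PySem.Str.replace acc (String.ofList [sym]) (String.ofList ['\\', sym]))
        (String.ofList (l.flatMap (fun x => if x == '\\' then ['\\', '\\'] else [x])))).toList =
      l.flatMap (fun c =>
        if c == '\\' || pyIsBoundarySym c || pyIsCommentSym c || pyIsUnitRefModifierSym c then
          ['\\', c] else [c]) := by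
  simp only [pvSpecials, List.foldl_cons, List.foldl_nil, PySem.Str.replace]
  simp only [String.toList_ofList, pv_replace_single, List.flatMap_assoc]
  apply List.flatMap_congr  -- pointwise equality of the composed substitution
  intro c _
  by_cases h : c ∈ ['\\', '~', '@', '%', '[', ']', '{', '}', ';', '&', '?', '/', '#', '$']
  · fin_cases h <;> rfl
  · simp only [List.mem_cons, List.not_mem_nil, or_false, not_or] at h
    obtain ⟨h1, h2, h3, h4, h5, h6, h7, h8, h9, h10, h11, h12, h13, h14⟩ := h
    simp [pyIsBoundarySym, pyIsCommentSym, pyIsUnitRefModifierSym,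
      h1, h2, h3, h4, h5, h6, h7, h8, h9, h10, h11, h12, h13, h14]

-- ===== VERDICT (by name: the statement is the Claim_ definition above) =====
theorem add_escapement_back_in_unit_ref_spec : Claim_equal_add_escapement_back_in_unit_ref := by
  intro s _
  unfold Spec_add_escapement_back_in_unit_ref add_escapement_back_in_unit_ref add_escapement_back_in_unit_ref_alt
  simp only
  rw [pv_escaped_eq]
  have h1 : PySem.Str.replace s "\\" "\\\\" =
      String.ofList (s.toList.flatMap (fun x => if x == '\\' then ['\\', '\\'] else [x])) := by
    simp only [PySem.Str.replace]
    congr 1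
    simpa using pv_replace_single '\\' ['\\', '\\'] s.toList
  rw [h1]
  have h2 : (pvSpecials.foldl
      (fun acc sym => PySem.Str.replace acc (String.ofList [sym]) (String.ofList ['\\', sym]))
      (String.ofList (s.toList.flatMap (fun x => if x == '\\' then ['\\', '\\'] else [x])))) =
      String.ofList (s.toList.flatMap (fun c =>
        if c == '\\' || pyIsBoundarySym c || pyIsCommentSym c || pyIsUnitRefModifierSym c then
          ['\\', c] else [c])) := by
    rw [← pv_staged_eq s.toList, String.ofList_toList]
  rw [h2]
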